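-- pv_equiv track=rewrite | github.com/ErnestSzczepaniak/image-control | header.py | field_description
-- ===== SOURCE A (Python) =====
-- from typing import Tuple
--
-- FIELDS = {
--     'header_magic':         16,
--     'header_protection':    16,
--     'header_crc':           16,
--     'header_hash':          128,
--
--     'firmware_id':          64,
--     'firmware_author':      32,
--     'firmware_file':        32,
--     'firmware_version':     32,
--     'firmware_stability':   32,
--     'firmware_date':        32,
--     'firmware_time':        32,
--     'firmware_vendor':      32,
--     'firmware_product':     32,
--     'firmware_model':       32,
--     'firmware_chip':        32,
--     'firmware_mode':        32,
--
--     'firmware_size':        16,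
--     'firmware_protection':  16,
--     'firmware_crc':         16,
--     'firmware_hash':        128,
--     'firmware_signature':   128,
--     'firmware_random':      128
-- }
--
-- def field_description(name: str) -> Tuple[int, int]:
--     position = 0
--     size = 0
--     for key, value in FIELDS.items():
--         if key == name:
--             size = value
--             break
--         position += value
--     return position, size
-- ===== SOURCE B (Python) =====
-- from typing import Tuple
--
-- FIELDS = {
--     'header_magic':         16,
--     'header_protection':    16,
--     'header_crc':           16,
--     'header_hash':          128,
--
--     'firmware_id':          64,
--     'firmware_author':      32,
--     'firmware_file':        32,
--     'firmware_version':     32,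
--     'firmware_stability':   32,
--     'firmware_date':        32,
--     'firmware_time':        32,
--     'firmware_vendor':      32,
--     'firmware_product':     32,
--     'firmware_model':       32,
--     'firmware_chip':        32,
--     'firmware_mode':        32,
--
--     'firmware_size':        16,
--     'firmware_protection':  16,
--     'firmware_crc':         16,
--     'firmware_hash':        128,
--     'firmware_signature':   128,
--     'firmware_random':      128
-- }
--
-- # Prebuilt once at import time: name -> (offset, size), plus the grand total of all sizes.
-- _TABLE = {}
-- _offset = 0
-- for _name, _size in FIELDS.items():
--     _TABLE[_name] = (_offset, _size)
--     _offset += _size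
-- _TOTAL = _offset
--
-- def field_description(name: str) -> Tuple[int, int]:
--     return _TABLE.get(name, (_TOTAL, 0))
-- ===== Notes on version B (the rewrite author's own statement) =====
-- stated objective: faster
-- what changed: Replaces the per-call accumulating scan of FIELDS (with break) by a module-level index built once mapping each name to (offset, size) plus the grand total, so the function body is a single dictionary lookup with default (TOTAL, 0).
import Mathlib
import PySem

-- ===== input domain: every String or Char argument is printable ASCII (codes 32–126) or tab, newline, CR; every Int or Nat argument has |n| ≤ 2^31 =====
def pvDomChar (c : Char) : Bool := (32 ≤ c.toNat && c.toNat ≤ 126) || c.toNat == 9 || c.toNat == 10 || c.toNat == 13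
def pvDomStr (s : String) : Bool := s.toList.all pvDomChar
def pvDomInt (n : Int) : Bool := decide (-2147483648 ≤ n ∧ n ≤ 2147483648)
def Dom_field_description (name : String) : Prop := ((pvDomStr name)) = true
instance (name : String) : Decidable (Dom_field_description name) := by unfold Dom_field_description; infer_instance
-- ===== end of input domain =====

-- B replaces A's per-call accumulating scan of FIELDS by a table prebuilt once
-- (name -> (offset, size), plus the total of all sizes), so each call is one lookup.


-- the shared module constant FIELDS (a dict literal; both sources carry it verbatim)
def FIELDS : List (String × Int) :=
  [("header_magic", 16), ("header_protection", 16), ("header_crc", 16), ("header_hash", 128),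
   ("firmware_id", 64), ("firmware_author", 32), ("firmware_file", 32), ("firmware_version", 32),
   ("firmware_stability", 32), ("firmware_date", 32), ("firmware_time", 32), ("firmware_vendor", 32),
   ("firmware_product", 32), ("firmware_model", 32), ("firmware_chip", 32), ("firmware_mode", 32),
   ("firmware_size", 16), ("firmware_protection", 16), ("firmware_crc", 16), ("firmware_hash", 128),
   ("firmware_signature", 128), ("firmware_random", 128)]

-- ===== PORT A =====
-- A's for-loop with break over FIELDS.items(), carrying the running position
def fdLoopA (name : String) (position : Int) : List (String × Int) → Int × Int
  | [] => (position, 0)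
  | (key, value) :: rest =>
      if key == name then (position, value) else fdLoopA name (position + value) rest

def field_description (name : String) : Int × Int :=
  fdLoopA name 0 FIELDS

-- ===== PORT B =====
-- the module-level setup loop of Source B: build the index dict and the running total once
def fdSetup : PySem.Dict String (Int × Int) × Int :=
  FIELDS.foldl (fun st p => (st.1.insert p.1 (st.2, p.2), st.2 + p.2)) (PySem.Dict.empty, 0)

def fdTable : PySem.Dict String (Int × Int) := fdSetup.1
def fdTotal : Int := fdSetup.2

def field_description_alt (name : String) : Int × Int :=
  (fdTable.get? name).getD (fdTotal, 0)

-- ===== PRECONDITION & SPEC =====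
def Spec_field_description (name : String) (out : Int × Int) : Prop := out = field_description_alt name
instance (name : String) (out : Int × Int) : Decidable (Spec_field_description name out) := by unfold Spec_field_description; infer_instance

-- ===== CLAIM (what is proved, stated in full; the proofs are below) =====
def Claim_equal_field_description : Prop := ∀ (name : String), Dom_field_description name → Spec_field_description name (field_description name)

-- ===== LEMMAS AND PROOFS =====

-- once name's entry is in the dict, later inserts at other keys do not disturb it
theorem fd_get?_foldl_of_some (l : List (String × Int)) (name : String)
    (d : PySem.Dict String (Int × Int)) (pos : Int) (w : Int × Int)
    (hmem : name ∉ l.map Prod.fst) (hd : d.get? name = some w) :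
    ((l.foldl (fun st p => (st.1.insert p.1 (st.2, p.2), st.2 + p.2)) (d, pos)).1).get? name
      = some w := by
  induction l generalizing d pos with
  | nil => simpa using hd
  | cons hd' tl ih =>
      simp only [List.map, List.mem_cons, not_or] at hmem
      simp only [List.foldl]
      exact ih _ _ hmem.2 (by rw [PySem.Dict.get?_insert_of_ne _ _ hmem.1, hd])

-- A's scan-with-break over l equals a lookup in the index the fold over l builds
theorem fd_loop_eq_lookup (l : List (String × Int)) (name : String)
    (d : PySem.Dict String (Int × Int)) (pos : Int)
    (hnd : (l.map Prod.fst).Nodup) (hd : d.get? name = none) :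
    fdLoopA name pos l
      = (((l.foldl (fun st p => (st.1.insert p.1 (st.2, p.2), st.2 + p.2)) (d, pos)).1).get? name).getD
          ((l.foldl (fun st p => (st.1.insert p.1 (st.2, p.2), st.2 + p.2)) (d, pos)).2, 0) := by
  induction l generalizing d pos with
  | nil => simp [fdLoopA, hd]
  | cons kv tl ih =>
      obtain ⟨k, v⟩ := kv
      simp only [List.map, List.nodup_cons] at hnd
      simp only [fdLoopA, List.foldl]
      by_cases hk : k == name
      · rw [if_pos hk]
        have hname : name = k := (beq_iff_eq.mp hk).symm
        have := fd_get?_foldl_of_some tl name (d.insert k (pos, v)) (pos + v) (pos, v)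
          (by simpa [hname] using hnd.1) (by rw [hname, PySem.Dict.get?_insert_self])
        rw [this]
        rfl
      · rw [if_neg (by simpa using hk)]
        have hne : name ≠ k := fun h => by simp [h] at hk
        exact ih _ _ hnd.2 (by rw [PySem.Dict.get?_insert_of_ne _ _ hne, hd])

-- ===== VERDICT (by name: the statement is the Claim_ definition above) =====
theorem field_description_spec : Claim_equal_field_description := by
  intro name _
  unfold Spec_field_description field_description field_description_alt fdTable fdTotal fdSetup
  exact fd_loop_eq_lookup FIELDS name PySem.Dict.empty 0 (by decide)
    (PySem.Dict.get?_empty name)
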